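-- pv_equiv track=rewrite | github.com/Kemalyavas/Scraping | scripts/match_fittings.py | _connections_match
-- ===== SOURCE A (Python) =====
-- def _connections_match(balflex_conn: str, heizmann_conn: str) -> bool:
--     """Check if connection types match"""
--     if not balflex_conn or not heizmann_conn:
--         return False
--
--     bal = balflex_conn.upper()
--     heiz = heizmann_conn.upper()
--
--     # Exact match
--     if bal == heiz:
--         return True
--
--     # Connection type equivalents
--     conn_groups = [
--         ['FERRULE', 'HOSE END', 'SLEEVE'],
--         ['ELBOW', '90', 'BEND'],
--         ['TEE', 'T', 'THREE-WAY'],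
--         ['ADAPTER', 'ADAPTOR', 'COUPLING'],
--         ['FLANGE', 'FLANSCH'],
--         ['STRAIGHT', 'STRIGHT', 'DIRECT'],
--     ]
--
--     for group in conn_groups:
--         if any(c in bal for c in group) and any(c in heiz for c in group):
--             return True
--
--     return False
-- ===== SOURCE B (Python) =====
-- _KW_GROUP = {
--     'FERRULE': 0, 'HOSE END': 0, 'SLEEVE': 0,
--     'ELBOW': 1, '90': 1, 'BEND': 1,
--     'TEE': 2, 'T': 2, 'THREE-WAY': 2,
--     'ADAPTER': 3, 'ADAPTOR': 3, 'COUPLING': 3,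
--     'FLANGE': 4, 'FLANSCH': 4,
--     'STRAIGHT': 5, 'STRIGHT': 5, 'DIRECT': 5,
-- }
--
-- def _connections_match(balflex_conn: str, heizmann_conn: str) -> bool:
--     """Check if connection types match"""
--     if not balflex_conn or not heizmann_conn:
--         return False
--     bal = balflex_conn.upper()
--     heiz = heizmann_conn.upper()
--     if bal == heiz:
--         return True
--     match_bal = {gid for kw, gid in _KW_GROUP.items() if kw in bal}
--     match_heiz = {gid for kw, gid in _KW_GROUP.items() if kw in heiz}
--     return bool(match_bal & match_heiz)
-- ===== Notes on version B (the rewrite author's own statement) =====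
-- stated objective: alternative
-- what changed: Replaces the nested loop over equivalence groups (group x keyword, with early return) by a flat keyword-to-group-id map: each string is reduced once to the set of group ids whose keyword it contains, and the result is the non-emptiness of the set intersection.
import Mathlib
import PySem

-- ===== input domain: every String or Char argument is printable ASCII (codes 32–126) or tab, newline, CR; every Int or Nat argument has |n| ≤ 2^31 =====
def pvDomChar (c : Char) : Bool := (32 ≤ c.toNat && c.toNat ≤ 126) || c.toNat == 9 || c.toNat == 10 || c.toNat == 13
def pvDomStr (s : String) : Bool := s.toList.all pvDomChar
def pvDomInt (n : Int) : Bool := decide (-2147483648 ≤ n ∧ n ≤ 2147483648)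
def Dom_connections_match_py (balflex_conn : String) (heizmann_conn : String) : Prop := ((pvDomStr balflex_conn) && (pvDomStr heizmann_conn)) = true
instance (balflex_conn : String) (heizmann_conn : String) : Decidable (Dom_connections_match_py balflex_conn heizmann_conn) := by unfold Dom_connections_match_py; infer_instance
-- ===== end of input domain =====

-- B replaces A's nested group×keyword loop by a flat keyword→group-id map and a set intersection (alternative decomposition, same cost).

-- ===== PORT A =====
def pvConnGroups : List (List String) :=
  [["FERRULE", "HOSE END", "SLEEVE"],
   ["ELBOW", "90", "BEND"],
   ["TEE", "T", "THREE-WAY"],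
   ["ADAPTER", "ADAPTOR", "COUPLING"],
   ["FLANGE", "FLANSCH"],
   ["STRAIGHT", "STRIGHT", "DIRECT"]]

-- 'for group in conn_groups: if any(c in bal ...) and any(c in heiz ...): return True' then 'return False'
def pvLoopA (groups : List (List String)) (bal heiz : String) : Bool :=
  match groups with
  | [] => false
  | g :: rest =>
    if (g.any fun c => PySem.Str.isIn c bal) && (g.any fun c => PySem.Str.isIn c heiz) then true
    else pvLoopA rest bal heiz

def connections_match_py (balflex_conn : String) (heizmann_conn : String) : Bool :=
  if balflex_conn == "" || heizmann_conn == "" then false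
  else
    let bal := PySem.Str.upper balflex_conn
    let heiz := PySem.Str.upper heizmann_conn
    if bal == heiz then true
    else pvLoopA pvConnGroups bal heiz

-- ===== PORT B =====
def pvKwGroup : List (String × Int) :=
  [("FERRULE", 0), ("HOSE END", 0), ("SLEEVE", 0),
   ("ELBOW", 1), ("90", 1), ("BEND", 1),
   ("TEE", 2), ("T", 2), ("THREE-WAY", 2),
   ("ADAPTER", 3), ("ADAPTOR", 3), ("COUPLING", 3),
   ("FLANGE", 4), ("FLANSCH", 4),
   ("STRAIGHT", 5), ("STRIGHT", 5), ("DIRECT", 5)]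

-- {gid for kw, gid in _KW_GROUP.items() if kw in s}
def pvMatchedGroups (s : String) : PySem.Set Int :=
  PySem.Set.ofList ((pvKwGroup.filter fun p => PySem.Str.isIn p.1 s).map Prod.snd)

def connections_match_py_alt (balflex_conn : String) (heizmann_conn : String) : Bool :=
  if balflex_conn == "" || heizmann_conn == "" then false
  else
    let bal := PySem.Str.upper balflex_conn
    let heiz := PySem.Str.upper heizmann_conn
    if bal == heiz then true
    else !(PySem.Set.inter (pvMatchedGroups bal) (pvMatchedGroups heiz)).isEmpty

-- ===== PRECONDITION & SPEC =====
def Spec_connections_match_py (balflex_conn : String) (heizmann_conn : String) (out : Bool) : Prop := out = connections_match_py_alt balflex_conn heizmann_conn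
instance (balflex_conn : String) (heizmann_conn : String) (out : Bool) : Decidable (Spec_connections_match_py balflex_conn heizmann_conn out) := by unfold Spec_connections_match_py; infer_instance

-- ===== CLAIM (what is proved, stated in full; the proofs are below) =====
def Claim_equal_connections_match_py : Prop := ∀ (balflex_conn : String) (heizmann_conn : String), Dom_connections_match_py balflex_conn heizmann_conn → Spec_connections_match_py balflex_conn heizmann_conn (connections_match_py balflex_conn heizmann_conn)

-- ===== LEMMAS AND PROOFS =====

theorem pv_mem_matched (s : String) (i : Int) :
    i ∈ pvMatchedGroups s ↔ ∃ p ∈ pvKwGroup, PySem.Str.isIn p.1 s = true ∧ p.2 = i := by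
  simp [pvMatchedGroups, PySem.Set.mem_ofList, List.mem_map, List.mem_filter]

-- membership in the B-side id set, spelled out per group id
theorem pv_matched_iff (s : String) (i : Int) :
    i ∈ pvMatchedGroups s ↔
      (i = 0 ∧ (PySem.Str.isIn "FERRULE" s = true ∨ PySem.Str.isIn "HOSE END" s = true ∨ PySem.Str.isIn "SLEEVE" s = true)) ∨
      (i = 1 ∧ (PySem.Str.isIn "ELBOW" s = true ∨ PySem.Str.isIn "90" s = true ∨ PySem.Str.isIn "BEND" s = true)) ∨
      (i = 2 ∧ (PySem.Str.isIn "TEE" s = true ∨ PySem.Str.isIn "T" s = true ∨ PySem.Str.isIn "THREE-WAY" s = true)) ∨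
      (i = 3 ∧ (PySem.Str.isIn "ADAPTER" s = true ∨ PySem.Str.isIn "ADAPTOR" s = true ∨ PySem.Str.isIn "COUPLING" s = true)) ∨
      (i = 4 ∧ (PySem.Str.isIn "FLANGE" s = true ∨ PySem.Str.isIn "FLANSCH" s = true)) ∨
      (i = 5 ∧ (PySem.Str.isIn "STRAIGHT" s = true ∨ PySem.Str.isIn "STRIGHT" s = true ∨ PySem.Str.isIn "DIRECT" s = true)) := by
  rw [pv_mem_matched]
  simp only [pvKwGroup, List.mem_cons, List.not_mem_nil, or_false, or_and_right, exists_or,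
    exists_eq_left]
  constructor
  · rintro (⟨hb, hi⟩|⟨hb, hi⟩|⟨hb, hi⟩|⟨hb, hi⟩|⟨hb, hi⟩|⟨hb, hi⟩|⟨hb, hi⟩|⟨hb, hi⟩|⟨hb, hi⟩|⟨hb, hi⟩|⟨hb, hi⟩|⟨hb, hi⟩|⟨hb, hi⟩|⟨hb, hi⟩|⟨hb, hi⟩|⟨hb, hi⟩|⟨hb, hi⟩) <;>
      subst hi <;> simp at hb <;> simp [hb]
  · rintro (⟨hi, hb⟩|⟨hi, hb⟩|⟨hi, hb⟩|⟨hi, hb⟩|⟨hi, hb⟩|⟨hi, hb⟩) <;> subst hi <;>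
      simp at hb ⊢ <;> tauto

theorem pv_inter_nonempty {s t : PySem.Set Int} :
    (!(PySem.Set.inter s t).isEmpty) = true ↔ ∃ x, x ∈ s ∧ x ∈ t := by
  rw [Bool.not_eq_eq_eq_not, Bool.not_true, List.isEmpty_eq_false_iff_exists_mem]
  exact ⟨fun ⟨x, hx⟩ => ⟨x, (PySem.Set.mem_inter _ _ _).1 hx⟩,
         fun ⟨x, hx⟩ => ⟨x, (PySem.Set.mem_inter _ _ _).2 hx⟩⟩

theorem pvLoopA_eq_any (gs : List (List String)) (bal heiz : String) :
    pvLoopA gs bal heiz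
      = gs.any (fun g => (g.any fun c => PySem.Str.isIn c bal) && (g.any fun c => PySem.Str.isIn c heiz)) := by
  induction gs with
  | nil => rfl
  | cons g rest ih =>
    simp only [pvLoopA, ih, List.any_cons]
    cases hc : (g.any fun c => PySem.Str.isIn c bal) && (g.any fun c => PySem.Str.isIn c heiz) <;> simp

-- A's group loop decides exactly non-emptiness of the intersection of B's id sets
theorem pv_loop_eq (bal heiz : String) :
    pvLoopA pvConnGroups bal heiz
      = !(PySem.Set.inter (pvMatchedGroups bal) (pvMatchedGroups heiz)).isEmpty := by
  rw [Bool.eq_iff_iff, pv_inter_nonempty, pvLoopA_eq_any]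
  simp only [pvConnGroups, List.any_cons, List.any_nil, Bool.or_false, Bool.or_eq_true,
    Bool.and_eq_true]
  constructor
  · rintro (⟨hb, hh⟩ | ⟨hb, hh⟩ | ⟨hb, hh⟩ | ⟨hb, hh⟩ | ⟨hb, hh⟩ | ⟨hb, hh⟩)
    · exact ⟨0, (pv_matched_iff _ _).2 (Or.inl ⟨rfl, hb⟩), (pv_matched_iff _ _).2 (Or.inl ⟨rfl, hh⟩)⟩
    · exact ⟨1, (pv_matched_iff _ _).2 (Or.inr (Or.inl ⟨rfl, hb⟩)),
        (pv_matched_iff _ _).2 (Or.inr (Or.inl ⟨rfl, hh⟩))⟩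
    · exact ⟨2, (pv_matched_iff _ _).2 (Or.inr (Or.inr (Or.inl ⟨rfl, hb⟩))),
        (pv_matched_iff _ _).2 (Or.inr (Or.inr (Or.inl ⟨rfl, hh⟩)))⟩
    · exact ⟨3, (pv_matched_iff _ _).2 (Or.inr (Or.inr (Or.inr (Or.inl ⟨rfl, hb⟩)))),
        (pv_matched_iff _ _).2 (Or.inr (Or.inr (Or.inr (Or.inl ⟨rfl, hh⟩))))⟩
    · exact ⟨4, (pv_matched_iff _ _).2 (Or.inr (Or.inr (Or.inr (Or.inr (Or.inl ⟨rfl, hb⟩))))),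
        (pv_matched_iff _ _).2 (Or.inr (Or.inr (Or.inr (Or.inr (Or.inl ⟨rfl, hh⟩)))))⟩
    · exact ⟨5, (pv_matched_iff _ _).2 (Or.inr (Or.inr (Or.inr (Or.inr (Or.inr ⟨rfl, hb⟩))))),
        (pv_matched_iff _ _).2 (Or.inr (Or.inr (Or.inr (Or.inr (Or.inr ⟨rfl, hh⟩)))))⟩
  · rintro ⟨i, hib, hih⟩
    rw [pv_matched_iff] at hib hih
    rcases hib with ⟨hi, hb⟩ | ⟨hi, hb⟩ | ⟨hi, hb⟩ | ⟨hi, hb⟩ | ⟨hi, hb⟩ | ⟨hi, hb⟩ <;> subst hi <;>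
      rcases hih with ⟨hi2, hh⟩ | ⟨hi2, hh⟩ | ⟨hi2, hh⟩ | ⟨hi2, hh⟩ | ⟨hi2, hh⟩ | ⟨hi2, hh⟩ <;>
      first
        | exact absurd hi2 (by decide)
        | exact Or.inl ⟨hb, hh⟩
        | exact Or.inr (Or.inl ⟨hb, hh⟩)
        | exact Or.inr (Or.inr (Or.inl ⟨hb, hh⟩))
        | exact Or.inr (Or.inr (Or.inr (Or.inl ⟨hb, hh⟩)))
        | exact Or.inr (Or.inr (Or.inr (Or.inr (Or.inl ⟨hb, hh⟩))))
        | exact Or.inr (Or.inr (Or.inr (Or.inr (Or.inr ⟨hb, hh⟩))))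

-- ===== VERDICT (by name: the statement is the Claim_ definition above) =====
theorem connections_match_py_spec : Claim_equal_connections_match_py := by
  intro bal heiz _
  unfold Spec_connections_match_py connections_match_py connections_match_py_alt
  simp only [pv_loop_eq]
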